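-- pv_equiv track=rewrite | github.com/dynos-fit/dynos-work | hooks/dynobench.py | touched_files
-- ===== SOURCE A (Python) =====
-- def touched_files(before: dict[str, str], after: dict[str, str]) -> int:
--     touched = 0
--     for path, digest in after.items():
--         if before.get(path) != digest:
--             touched += 1
--     for path in before:
--         if path not in after:
--             touched += 1
--     return touched
-- ===== SOURCE B (Python) =====
-- def touched_files(before: dict[str, str], after: dict[str, str]) -> int:
--     bk = before.keys()
--     ak = after.keys()
--     added_removed = len(bk ^ ak)
--     modified = sum(1 for p in bk & ak if before[p] != after[p])
--     return added_removed + modified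
-- ===== Notes on version B (the rewrite author's own statement) =====
-- stated objective: alternative
-- what changed: Replaces A's two guarded full scans (after-loop with before.get, before-loop with 'not in after') by key-set algebra: the size of the symmetric difference of the key sets plus one intersection-only scan counting differing values.
import Mathlib
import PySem

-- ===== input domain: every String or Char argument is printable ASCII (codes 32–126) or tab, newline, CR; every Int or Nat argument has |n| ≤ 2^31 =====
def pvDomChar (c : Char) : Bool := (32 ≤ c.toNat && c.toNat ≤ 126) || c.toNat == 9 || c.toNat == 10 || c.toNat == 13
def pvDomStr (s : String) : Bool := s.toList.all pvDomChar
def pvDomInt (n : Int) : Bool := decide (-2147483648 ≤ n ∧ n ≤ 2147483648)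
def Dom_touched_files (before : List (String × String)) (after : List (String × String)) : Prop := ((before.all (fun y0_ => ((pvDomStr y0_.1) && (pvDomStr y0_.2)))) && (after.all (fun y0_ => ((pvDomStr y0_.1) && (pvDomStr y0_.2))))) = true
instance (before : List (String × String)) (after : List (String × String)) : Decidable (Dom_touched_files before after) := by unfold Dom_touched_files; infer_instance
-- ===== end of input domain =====

-- B replaces A's two guarded scans by key-set algebra (symmetric difference + one
-- intersection-only scan); same cost, different decomposition ("alternative").

-- ===== PORT A =====
def touched_files (before : List (String × String)) (after : List (String × String)) : Int :=
  -- touched = 0; for path, digest in after.items(): if before.get(path) != digest: touched += 1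
  let touched : Int := after.foldl
    (fun touched pd =>
      if (PySem.Dict.mk before).get? pd.1 ≠ some pd.2 then touched + 1 else touched) 0
  -- for path in before: if path not in after: touched += 1
  before.foldl
    (fun touched pd =>
      if ¬ ((PySem.Dict.mk after).contains pd.1 = true) then touched + 1 else touched) touched

-- ===== PORT B =====
def touched_files_alt (before : List (String × String)) (after : List (String × String)) : Int :=
  let bk := PySem.Set.ofList (before.map Prod.fst)
  let ak := PySem.Set.ofList (after.map Prod.fst)
  let added_removed : Int := PySem.Set.len (PySem.Set.symmDiff bk ak)
  -- before[p] / after[p] on common keys, ported as get? (both keys are present there)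
  let modified : Int :=
    ((PySem.Set.inter bk ak).filter
      (fun p => (PySem.Dict.mk before).get? p ≠ (PySem.Dict.mk after).get? p)).length
  added_removed + modified

-- ===== PRECONDITION & SPEC =====
-- Pre_ excludes association lists with duplicate keys: they do not arise from Python
-- dict arguments, and on them A counts per entry while B counts per key.
def Pre_touched_files (before : List (String × String)) (after : List (String × String)) : Prop :=
  (before.map Prod.fst).Nodup ∧ (after.map Prod.fst).Nodup
instance (before : List (String × String)) (after : List (String × String)) : Decidable (Pre_touched_files before after) := by unfold Pre_touched_files; infer_instance

def pvWitness_touched_files : (List (String × String)) × (List (String × String)) :=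
  ([("a", "1"), ("b", "2")], [("a", "9"), ("c", "2")])

def Spec_touched_files (before : List (String × String)) (after : List (String × String)) (out : Int) : Prop := out = touched_files_alt before after
instance (before : List (String × String)) (after : List (String × String)) (out : Int) : Decidable (Spec_touched_files before after out) := by unfold Spec_touched_files; infer_instance

-- ===== CLAIM (what is proved, stated in full; the proofs are below) =====
def Claim_equal_touched_files : Prop := ∀ (before : List (String × String)) (after : List (String × String)), Dom_touched_files before after → Pre_touched_files before after → Spec_touched_files before after (touched_files before after)

-- ===== LEMMAS AND PROOFS =====

-- splitting a countP along a second predicate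
theorem countP_split {α : Type} (l : List α) (p q : α → Bool) :
    l.countP p = (l.filter q).countP p + (l.filter (fun x => !q x)).countP p := by
  induction l with
  | nil => simp
  | cons x xs ih =>
    by_cases h : q x = true <;>
      simp [List.countP_cons, h, ih] <;> omega

-- the two guarded scans of A count exactly what B's set algebra counts (Nat level)
theorem pv_count_eq (before after : List (String × String))
    (hb : (before.map Prod.fst).Nodup) (ha : (after.map Prod.fst).Nodup) :
    after.countP (fun x => decide ((PySem.Dict.mk before).get? x.1 ≠ some x.2))
      + before.countP (fun x => decide (¬ (PySem.Dict.mk after).contains x.1 = true))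
    = (((before.map Prod.fst).filter (fun x => !decide (x ∈ after.map Prod.fst))).length
      + ((after.map Prod.fst).filter (fun x => !decide (x ∈ before.map Prod.fst))).length)
      + (((before.map Prod.fst).filter (fun x => decide (x ∈ after.map Prod.fst))).filter
          (fun p => decide ((PySem.Dict.mk before).get? p ≠ (PySem.Dict.mk after).get? p))).length := by
  have hBefore : before.countP (fun x => decide (¬ (PySem.Dict.mk after).contains x.1 = true))
      = (before.map Prod.fst).countP (fun p => !decide (p ∈ after.map Prod.fst)) := by
    rw [List.countP_map]
    apply List.countP_congr
    intro x _
    rw [PySem.Dict.contains_eq_decide_mem_keys, PySem.Dict.keys_mk]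
    simp [Function.comp]
  have hAfter : after.countP (fun x => decide ((PySem.Dict.mk before).get? x.1 ≠ some x.2))
      = (after.map Prod.fst).countP
          (fun p => decide ((PySem.Dict.mk before).get? p ≠ (PySem.Dict.mk after).get? p)) := by
    rw [List.countP_map]
    apply List.countP_congr
    intro x hx
    have hget : (PySem.Dict.mk after).get? x.1 = some x.2 :=
      PySem.Dict.get?_of_mem_items (PySem.Dict.mk after) (by simpa using hx)
        (by simpa [PySem.Dict.keys_mk] using ha)
    simp [Function.comp, hget]
  have hsplit := countP_split (after.map Prod.fst)
      (fun p => decide ((PySem.Dict.mk before).get? p ≠ (PySem.Dict.mk after).get? p))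
      (fun p => decide (p ∈ before.map Prod.fst))
  have hout : ((after.map Prod.fst).filter (fun p => !decide (p ∈ before.map Prod.fst))).countP
        (fun p => decide ((PySem.Dict.mk before).get? p ≠ (PySem.Dict.mk after).get? p))
      = ((after.map Prod.fst).filter (fun p => !decide (p ∈ before.map Prod.fst))).length := by
    apply List.countP_eq_length.mpr
    intro p hp
    rw [List.mem_filter] at hp
    have hpak : p ∈ after.map Prod.fst := hp.1
    have hpbk : p ∉ before.map Prod.fst := by simpa using hp.2
    have h1 : (PySem.Dict.mk before).get? p = none := by
      rw [PySem.Dict.get?_eq_none_iff_not_mem_keys]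
      simpa [PySem.Dict.keys_mk] using hpbk
    have h2 : (PySem.Dict.mk after).get? p ≠ none := by
      rw [Ne, PySem.Dict.get?_eq_none_iff_not_mem_keys]
      simp [PySem.Dict.keys_mk, hpak]
    simp only [decide_eq_true_eq, h1]
    exact fun h => h2 h.symm
  have hcommon : ((after.map Prod.fst).filter (fun p => decide (p ∈ before.map Prod.fst))).countP
        (fun p => decide ((PySem.Dict.mk before).get? p ≠ (PySem.Dict.mk after).get? p))
      = (((before.map Prod.fst).filter (fun x => decide (x ∈ after.map Prod.fst))).filter
          (fun p => decide ((PySem.Dict.mk before).get? p ≠ (PySem.Dict.mk after).get? p))).length := by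
    rw [List.countP_eq_length_filter]
    apply List.Perm.length_eq
    apply (List.perm_ext_iff_of_nodup ((ha.filter _).filter _) ((hb.filter _).filter _)).mpr
    intro x
    simp only [List.mem_filter, decide_eq_true_eq]
    tauto
  rw [hBefore, hAfter, hsplit, hout, hcommon, List.countP_eq_length_filter]
  omega

-- ===== VERDICT (by name: the statement is the Claim_ definition above) =====
theorem touched_files_spec : Claim_equal_touched_files := by
  intro before after _ hpre
  obtain ⟨hb, ha⟩ := hpre
  unfold Spec_touched_files touched_files touched_files_alt
  rw [PySem.List.foldl_ite_add_one, PySem.List.foldl_ite_add_one]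
  simp only [PySem.Set.ofList_eq_self_of_nodup _ hb, PySem.Set.ofList_eq_self_of_nodup _ ha,
    PySem.Set.len, PySem.Set.symmDiff, PySem.Set.diff, PySem.Set.inter, zero_add,
    List.length_append, PySem.Set.contains_eq_listContains, List.contains_eq_mem]
  have h := pv_count_eq before after hb ha
  omega
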